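-- pv_equiv track=rewrite | github.com/912-enache-vlad/Fundamentals-of-programming | Assignment_1/p2.py | TwinPrimeNumbersLargerThanN
-- ===== SOURCE A (Python) =====
-- def TwinPrimeNumbersLargerThanN(n):
--     # Making the Sieve Of Eratosthenes
--     sieve = [False] * 1000000
--     sieve[0] = sieve[1] = True
--     i = 0
--     while i * i < 1000000 :
--         if(sieve[i] == False): # if it is a prime number
--             j = 2
--             while(i * j < 1000000):
--                 sieve[i * j] = True
--                 j += 1
--         i += 1
--     #searching for the twin prime numbers
--     found = False
--     p1 = n + 1
--     while(found == False):
--         if(sieve[p1] == False and sieve[p1 + 2] == False):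
--             found = True
--             return p1, p1 + 2
--         p1 += 1
-- ===== SOURCE B (Python) =====
-- def TwinPrimeNumbersLargerThanN(n):
--     def is_prime(p):
--         if p < 2:
--             return False
--         d = 2
--         while d * d <= p:
--             if p % d == 0:
--                 return False
--             d += 1
--         return True
--
--     p = n + 1 if n + 1 > 3 else 3
--     while True:
--         if is_prime(p) and is_prime(p + 2):
--             return p, p + 2
--         p += 1
-- ===== Notes on version B (the rewrite author's own statement) =====
-- stated objective: faster
-- what changed: Replaces the fixed 1,000,000-entry Sieve of Eratosthenes built on every call by direct trial-division primality tests on the few candidates from max(n+1,3) until the first twin pair is found.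
-- intended difference: For -1000001 <= n < -41 Python's negative-index wraparound makes A's sieve lookups read indices 10^6+p, so A returns a negative pseudo-pair (e.g. (-41,-39), the shifted image of the twin pair (999959,999961)), while B returns (3,5), the true first twin prime pair greater than such n. — e.g. on TwinPrimeNumbersLargerThanN(-42): A returns [-41, -39], B returns [3, 5]
-- outside the precondition, e.g. on TwinPrimeNumbersLargerThanN(-1000002): A raises IndexError, B returns (3, 5); on TwinPrimeNumbersLargerThanN(999959): A raises IndexError, B returns (1000037, 1000039)
import Mathlib
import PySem

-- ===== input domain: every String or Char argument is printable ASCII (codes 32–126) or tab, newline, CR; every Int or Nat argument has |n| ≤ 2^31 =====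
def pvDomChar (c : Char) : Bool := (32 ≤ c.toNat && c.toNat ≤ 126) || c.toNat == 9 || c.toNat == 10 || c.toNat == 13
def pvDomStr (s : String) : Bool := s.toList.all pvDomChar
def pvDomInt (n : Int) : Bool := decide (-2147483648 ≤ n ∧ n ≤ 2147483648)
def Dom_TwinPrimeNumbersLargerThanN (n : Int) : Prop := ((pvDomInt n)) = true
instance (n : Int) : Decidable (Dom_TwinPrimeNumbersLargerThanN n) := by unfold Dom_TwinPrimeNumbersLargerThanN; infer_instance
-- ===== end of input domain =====

-- B replaces A's fixed 10^6-entry Sieve of Eratosthenes (rebuilt on every call) by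
-- trial-division primality tests on the few candidates from max(n+1,3): asymptotically
-- less work for every admitted n.

-- ===== PORT A =====
-- inner 'while i*j < 1000000' marking loop; 'fuel' is only a totality guard
-- (1000000 steps always suffice: j starts at 2 and i ≥ 2 whenever the loop is entered)
def pvMarkMul (i : Nat) : Nat → Nat → Array Bool → Array Bool
  | 0, _, s => s
  | fuel + 1, j, s =>
    if i * j < 1000000 then pvMarkMul i fuel (j + 1) (s.set! (i * j) true) else s

-- outer 'while i*i < 1000000' loop; 'fuel' is only a totality guard (the loop exits at
-- i = 1000, so the 1000 it is called with is exact)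
def pvSieveLoop : Nat → Nat → Array Bool → Array Bool
  | 0, _, s => s
  | fuel + 1, i, s =>
    if i * i < 1000000 then
      pvSieveLoop fuel (i + 1) (if s[i]! = false then pvMarkMul i 1000000 2 s else s)
    else s

-- 'sieve = [False]*1000000; sieve[0] = sieve[1] = True', then the marking loops
def pvSieve : Array Bool :=
  pvSieveLoop 1000 0 (((Array.replicate 1000000 false).set! 0 true).set! 1 true)

-- 'while found == False' search; [] models the IndexError raise, the 'if p1 < 0' lookups
-- are Python's negative-index rule for a length-1000000 list (exact there), and 'fuel' is
-- only a totality guard (p1 only grows, so 2000002 steps always reach a return or the raise)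
def pvSearch : Nat → Array Bool → Int → List Int
  | 0, _, _ => []
  | fuel + 1, s, p1 =>
    if p1 < -1000000 ∨ 1000000 ≤ p1 then []  -- sieve[p1] raises IndexError
    else
      let v1 : Bool := if p1 < 0 then s[(p1 + 1000000).toNat]! else s[p1.toNat]!
      if v1 = false then
        if 1000000 ≤ p1 + 2 then []  -- sieve[p1+2] raises IndexError (only reached when v1 is False)
        else
          let v2 : Bool := if p1 + 2 < 0 then s[(p1 + 2 + 1000000).toNat]! else s[(p1 + 2).toNat]!
          if v2 = false then [p1, p1 + 2] else pvSearch fuel s (p1 + 1)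
      else pvSearch fuel s (p1 + 1)

def TwinPrimeNumbersLargerThanN (n : Int) : List Int := pvSearch 2000002 pvSieve (n + 1)

-- ===== PORT B =====
-- 'while d*d <= p: if p % d == 0: return False; d += 1'; 'fuel' is only a totality guard
-- (d*d passes any p with |p| ≤ 2^31 + 2 well within 50000 steps)
def pvTrial : Nat → Int → Int → Bool
  | 0, _, _ => true
  | fuel + 1, p, d =>
    if d * d ≤ p then
      if PySem.Int.mod p d == 0 then false else pvTrial fuel p (d + 1)
    else true

def pvIsPrime (p : Int) : Bool :=
  if p < 2 then false else pvTrial 50000 p 2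

-- 'while True' candidate search; 'fuel' is only a totality guard (on every input admitted
-- by Pre_ the twin pair (999959, 999961) is reached long before 1000000 steps)
def pvFind : Nat → Int → List Int
  | 0, _ => []
  | fuel + 1, p => if pvIsPrime p && pvIsPrime (p + 2) then [p, p + 2] else pvFind fuel (p + 1)

def TwinPrimeNumbersLargerThanN_alt (n : Int) : List Int :=
  pvFind 1000000 (if n + 1 > 3 then n + 1 else 3)

-- ===== PRECONDITION & SPEC =====
-- Pre_ is exactly the set of inputs on which Python A returns: for n ≤ -1000002 the very
-- first lookup sieve[n+1] raises IndexError, and for n ≥ 999959 the search walks past the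
-- last twin pair below 10^6 and sieve[1000000] raises IndexError.
def Pre_TwinPrimeNumbersLargerThanN (n : Int) : Prop := -1000001 ≤ n ∧ n ≤ 999958
instance (n : Int) : Decidable (Pre_TwinPrimeNumbersLargerThanN n) := by
  unfold Pre_TwinPrimeNumbersLargerThanN; infer_instance
def pvWitness_TwinPrimeNumbersLargerThanN : Int := 10

-- For -1000001 ≤ n < -41 Python's negative-index wraparound makes A's sieve lookups read
-- indices 10^6+p, so A returns a negative pseudo-pair (e.g. (-41,-39), the shifted image of
-- the twin pair (999959,999961)), while B returns (3,5), the true first twin prime pair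
-- greater than such n.
def D_TwinPrimeNumbersLargerThanN (n : Int) : Prop := n < -41
instance (n : Int) : Decidable (D_TwinPrimeNumbersLargerThanN n) := by
  unfold D_TwinPrimeNumbersLargerThanN; infer_instance

def Spec_TwinPrimeNumbersLargerThanN (n : Int) (out : List Int) : Prop :=
  ¬ D_TwinPrimeNumbersLargerThanN n → out = TwinPrimeNumbersLargerThanN_alt n
instance (n : Int) (out : List Int) : Decidable (Spec_TwinPrimeNumbersLargerThanN n out) := by
  unfold Spec_TwinPrimeNumbersLargerThanN; infer_instance

def pvDiffWitness_TwinPrimeNumbersLargerThanN : Int := -42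
def pvDiffWitnessOut_TwinPrimeNumbersLargerThanN : (List Int) × (List Int) :=
  ([-41, -39], [3, 5])

-- ===== CLAIM (what is proved, stated in full; the proofs are below) =====
def Claim_unchanged_TwinPrimeNumbersLargerThanN : Prop := ∀ (n : Int), Dom_TwinPrimeNumbersLargerThanN n → Pre_TwinPrimeNumbersLargerThanN n → Spec_TwinPrimeNumbersLargerThanN n (TwinPrimeNumbersLargerThanN n)
def Claim_changed_TwinPrimeNumbersLargerThanN : Prop := Dom_TwinPrimeNumbersLargerThanN (pvDiffWitness_TwinPrimeNumbersLargerThanN) ∧ Pre_TwinPrimeNumbersLargerThanN (pvDiffWitness_TwinPrimeNumbersLargerThanN) ∧ D_TwinPrimeNumbersLargerThanN (pvDiffWitness_TwinPrimeNumbersLargerThanN) ∧ TwinPrimeNumbersLargerThanN (pvDiffWitness_TwinPrimeNumbersLargerThanN) = pvDiffWitnessOut_TwinPrimeNumbersLargerThanN.1 ∧ TwinPrimeNumbersLargerThanN_alt (pvDiffWitness_TwinPrimeNumbersLargerThanN) = pvDiffWitnessOut_TwinPrimeNumbersLargerThanN.2 ∧ pvDiffWitnessOut_TwinPrimeNumbersLargerThanN.1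 ≠ pvDiffWitnessOut_TwinPrimeNumbersLargerThanN.2
def Claim_exact_TwinPrimeNumbersLargerThanN : Prop := ∀ (n : Int), Dom_TwinPrimeNumbersLargerThanN n → Pre_TwinPrimeNumbersLargerThanN n → D_TwinPrimeNumbersLargerThanN n → TwinPrimeNumbersLargerThanN n ≠ TwinPrimeNumbersLargerThanN_alt n

-- ===== LEMMAS AND PROOFS =====

theorem pvGetSet (s : Array Bool) (m k : Nat) (v : Bool) (hm : m < s.size) (hk : k < s.size) :
    (s.set! m v)[k]! = if m = k then v else s[k]! := by
  rw [Array.set!_eq_setIfInBounds, Array.getElem!_eq_getD, Array.getElem!_eq_getD]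
  unfold Array.getD
  simp [Array.size_setIfInBounds, hk, Array.getElem_setIfInBounds]

theorem pvMarkMul_size (i : Nat) : ∀ (fuel j : Nat) (s : Array Bool),
    (pvMarkMul i fuel j s).size = s.size := by
  intro fuel
  induction fuel with
  | zero => intro j s; rfl
  | succ f ih =>
    intro j s
    rw [pvMarkMul]
    split
    · rw [ih]; simp [Array.set!_eq_setIfInBounds, Array.size_setIfInBounds]
    · rfl

theorem pvMarkMul_get (i : Nat) (hi : 1 ≤ i) : ∀ (fuel j : Nat) (s : Array Bool),
    s.size = 1000000 → 1000000 ≤ i * (j + fuel) → ∀ k, k < 1000000 →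
    ((pvMarkMul i fuel j s)[k]! = true ↔ s[k]! = true ∨ (i ∣ k ∧ i * j ≤ k)) := by
  intro fuel
  induction fuel with
  | zero =>
    intro j s hs hf k hk
    simp only [pvMarkMul]
    constructor
    · exact Or.inl
    · rintro (h | ⟨hd, hle⟩)
      · exact h
      · simp only [Nat.add_zero] at hf; omega
  | succ f ih =>
    intro j s hs hf k hk
    rw [pvMarkMul]
    split
    · rename_i hlt
      rw [ih (j+1) _ (by simp [Array.set!_eq_setIfInBounds, Array.size_setIfInBounds, hs]) (by rw [show j+1+f = j+(f+1) from by omega]; exact hf) k hk]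
      rw [pvGetSet s (i*j) k true (by omega) (by omega)]
      by_cases he : i * j = k
      · subst he
        rw [if_pos rfl]
        constructor
        · intro _; exact Or.inr ⟨Dvd.intro j rfl, le_refl _⟩
        · intro _; exact Or.inl rfl
      · rw [if_neg he]
        constructor
        · rintro (h | ⟨hd, hle⟩)
          · exact Or.inl h
          · exact Or.inr ⟨hd, by nlinarith⟩
        · rintro (h | ⟨hd, hle⟩)
          · exact Or.inl h
          · obtain ⟨m, rfl⟩ := hd
            refine Or.inr ⟨Dvd.intro m rfl, ?_⟩
            have : j < m := by
              rcases Nat.lt_or_ge j m with h' | h'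
              · exact h'
              · exfalso
                have : i * m ≤ i * j := Nat.mul_le_mul_left i h'
                omega
            exact Nat.mul_le_mul_left i (by omega)
    · rename_i hge
      constructor
      · exact Or.inl
      · rintro (h | ⟨hd, hle⟩)
        · exact h
        · omega

def pvSInv (i : Nat) (s : Array Bool) : Prop :=
  s.size = 1000000 ∧ ∀ k, k < 1000000 →
    (s[k]! = true ↔ (k < 2 ∨ (¬ Nat.Prime k ∧ ∃ q, Nat.Prime q ∧ q < i ∧ q ∣ k)))

theorem pvInvInit : pvSInv 0 (((Array.replicate 1000000 false).set! 0 true).set! 1 true) := by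
  have hs1 : ((Array.replicate 1000000 false).set! 0 true).size = 1000000 := by
    simp [Array.set!_eq_setIfInBounds, Array.size_setIfInBounds]
  constructor
  · simp [Array.set!_eq_setIfInBounds, Array.size_setIfInBounds]
  · intro k hk
    rw [pvGetSet _ 1 k true (by omega) (by omega)]
    have hget : ∀ m, m < 1000000 → (Array.replicate 1000000 false)[m]! = false := by
      intro m hm
      rw [Array.getElem!_eq_getD]
      unfold Array.getD
      simp [hm]
    by_cases h1 : (1 : Nat) = k
    · subst h1
      rw [if_pos rfl]
      constructor
      · intro _; exact Or.inl (by omega)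
      · intro _; rfl
    · rw [if_neg h1]
      rw [pvGetSet _ 0 k true (by simp [Array.size_replicate]) (by simp [Array.size_replicate]; omega)]
      by_cases h0 : (0 : Nat) = k
      · subst h0
        rw [if_pos rfl]
        constructor
        · intro _; exact Or.inl (by omega)
        · intro _; rfl
      · rw [if_neg h0, hget k hk]
        constructor
        · intro h; exact absurd h (by simp)
        · rintro (h | ⟨_, q, _, hq0, _⟩)
          · omega
          · omega

theorem pvStep (i : Nat) (s : Array Bool) (hinv : pvSInv i s) (hii : i * i < 1000000) :
    pvSInv (i + 1) (if s[i]! = false then pvMarkMul i 1000000 2 s else s) := by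
  obtain ⟨hsz, hch⟩ := hinv
  have hiM : i < 1000000 := by nlinarith
  by_cases hb : s[i]! = false
  · rw [if_pos hb]
    -- the branch runs only when i is prime
    have hnot : ¬ (i < 2 ∨ (¬ Nat.Prime i ∧ ∃ q, Nat.Prime q ∧ q < i ∧ q ∣ i)) := by
      intro h; rw [← hch i hiM] at h; rw [hb] at h; exact Bool.false_ne_true h
    have hi2 : ¬ i < 2 := fun h => hnot (Or.inl h)
    have hprime : Nat.Prime i := by
      by_contra hp
      refine hnot (Or.inr ⟨hp, i.minFac, Nat.minFac_prime (by omega), ?_, Nat.minFac_dvd i⟩)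
      have hle := Nat.minFac_le (n := i) (by omega)
      have hne : i.minFac ≠ i := by
        intro he
        exact hp (Nat.prime_def_minFac.mpr ⟨by omega, he⟩)
      omega
    have hi1 : 1 ≤ i := by omega
    constructor
    · rw [pvMarkMul_size, hsz]
    · intro k hk
      rw [pvMarkMul_get i hi1 1000000 2 s hsz (by nlinarith) k hk]
      constructor
      · rintro (h | ⟨hd, hle⟩)
        · rcases (hch k hk).mp h with h' | ⟨hnpk, q, hqp, hqlt, hqd⟩
          · exact Or.inl h'
          · exact Or.inr ⟨hnpk, q, hqp, by omega, hqd⟩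
        · have hk2 : 2 * i ≤ k := by omega
          have hnpk : ¬ Nat.Prime k := by
            intro hpk
            rcases hpk.eq_one_or_self_of_dvd i hd with h1 | h1
            · omega
            · omega
          exact Or.inr ⟨hnpk, i, hprime, by omega, hd⟩
      · rintro (h | ⟨hnpk, q, hqp, hqlt, hqd⟩)
        · exact Or.inl ((hch k hk).mpr (Or.inl h))
        · by_cases hqi : q < i
          · exact Or.inl ((hch k hk).mpr (Or.inr ⟨hnpk, q, hqp, hqi, hqd⟩))
          · have hqe : q = i := by omega
            subst hqe
            obtain ⟨m, rfl⟩ := hqd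
            match m with
            | 0 => exact Or.inl ((hch _ (by omega)).mpr (Or.inl (by omega)))
            | 1 => simp at hnpk; exact absurd hprime (by simpa using hnpk)
            | (m+2) =>
              refine Or.inr ⟨Dvd.intro (m+2) rfl, ?_⟩
              have : q * 2 ≤ q * (m + 2) := Nat.mul_le_mul_left q (by omega)
              omega
  · rw [if_neg hb]
    have hbt : s[i]! = true := by
      cases h : s[i]! with
      | false => exact absurd h hb
      | true => rfl
    constructor
    · exact hsz
    · intro k hk
      rw [hch k hk]
      constructor
      · rintro (h | ⟨hnpk, q, hqp, hqlt, hqd⟩)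
        · exact Or.inl h
        · exact Or.inr ⟨hnpk, q, hqp, by omega, hqd⟩
      · rintro (h | ⟨hnpk, q, hqp, hqlt, hqd⟩)
        · exact Or.inl h
        · by_cases hqi : q < i
          · exact Or.inr ⟨hnpk, q, hqp, hqi, hqd⟩
          · have hqe : q = i := by omega
            subst hqe
            rcases (hch q (by omega)).mp hbt with h' | ⟨hnpi, _⟩
            · exact absurd hqp (by have : q = 0 ∨ q = 1 := by omega
                                   rcases this with rfl | rfl <;> decide)
            · exact absurd hqp hnpi

theorem pvExit (i : Nat) (s : Array Bool) (hinv : pvSInv i s) (hii : 1000000 ≤ i * i) :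
    s.size = 1000000 ∧ ∀ k, k < 1000000 → (s[k]! = true ↔ ¬ Nat.Prime k) := by
  obtain ⟨hsz, hch⟩ := hinv
  refine ⟨hsz, fun k hk => ?_⟩
  rw [hch k hk]
  constructor
  · rintro (h' | ⟨hnpk, _⟩)
    · have : k = 0 ∨ k = 1 := by omega
      rcases this with rfl | rfl <;> decide
    · exact hnpk
  · intro hnpk
    by_cases h2 : k < 2
    · exact Or.inl h2
    · refine Or.inr ⟨hnpk, k.minFac, Nat.minFac_prime (by omega), ?_, Nat.minFac_dvd k⟩
      have hsq := Nat.minFac_sq_le_self (n := k) (by omega) hnpk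
      by_contra hge
      push_neg at hge
      have h1 : i * i ≤ k.minFac * k.minFac := Nat.mul_le_mul hge hge
      have h2 : k.minFac ^ 2 = k.minFac * k.minFac := sq k.minFac
      omega

theorem pvLoop_char : ∀ (fuel i : Nat) (s : Array Bool), pvSInv i s → 1000 ≤ i + fuel →
    (pvSieveLoop fuel i s).size = 1000000 ∧
    ∀ k, k < 1000000 → ((pvSieveLoop fuel i s)[k]! = true ↔ ¬ Nat.Prime k) := by
  intro fuel
  induction fuel with
  | zero =>
    intro i s hinv hf
    simp only [pvSieveLoop]
    refine pvExit i s hinv ?_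
    have h1 : 1000 * 1000 ≤ i * i := Nat.mul_le_mul (by omega) (by omega)
    omega
  | succ f ih =>
    intro i s hinv hf
    rw [pvSieveLoop]
    by_cases hii : i * i < 1000000
    · rw [if_pos hii]
      exact ih (i + 1) _ (pvStep i s hinv hii) (by omega)
    · rw [if_neg hii]
      exact pvExit i s hinv (by omega)

theorem pvSieve_char : pvSieve.size = 1000000 ∧
    ∀ k, k < 1000000 → (pvSieve[k]! = true ↔ ¬ Nat.Prime k) :=
  pvLoop_char 1000 0 _ pvInvInit (by omega)

theorem pvTrial_iff (p : Int) : ∀ (fuel : Nat) (d : Int), 1 ≤ d →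
    p < (d + (fuel : Int)) * (d + (fuel : Int)) →
    (pvTrial fuel p d = true ↔ ∀ m : Int, d ≤ m → m * m ≤ p → ¬ (m ∣ p)) := by
  intro fuel
  induction fuel with
  | zero =>
    intro d hd hlt
    simp only [Nat.cast_zero, add_zero] at hlt
    simp only [pvTrial, true_iff]
    intro m hm hmp hdvd
    nlinarith
  | succ f ih =>
    intro d hd hlt
    rw [pvTrial]
    by_cases hdp : d * d ≤ p
    · rw [if_pos hdp]
      by_cases hmod : PySem.Int.mod p d == 0
      · rw [if_pos hmod]
        have hdvd : d ∣ p := (PySem.Int.mod_eq_zero_iff_dvd p d).mp (by simpa using hmod)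
        constructor
        · intro h; exact absurd h (by simp)
        · intro h; exact absurd hdvd (h d le_rfl hdp)
      · rw [if_neg hmod]
        have hndvd : ¬ d ∣ p := fun hdvd =>
          hmod (by simp [(PySem.Int.mod_eq_zero_iff_dvd p d).mpr hdvd])
        rw [ih (d + 1) (by omega) (lt_of_lt_of_eq hlt (by push_cast; ring))]
        constructor
        · intro h m hm hmp hdvd
          rcases eq_or_lt_of_le hm with rfl | hlt'
          · exact hndvd hdvd
          · exact h m (by omega) hmp hdvd
        · intro h m hm hmp hdvd
          exact h m (by omega) hmp hdvd
    · rw [if_neg hdp]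
      simp only [true_iff]
      intro m hm hmp hdvd
      exact hdp (by nlinarith)

theorem pvIsPrime_iff (p : Int) (hbd : p ≤ 2147483651) :
    pvIsPrime p = true ↔ 2 ≤ p ∧ Nat.Prime p.toNat := by
  unfold pvIsPrime
  by_cases h2 : p < 2
  · rw [if_pos h2]
    constructor
    · intro h; exact absurd h (by simp)
    · rintro ⟨h, _⟩; omega
  · rw [if_neg h2]
    push_neg at h2
    rw [pvTrial_iff p 50000 2 (by omega) (by
      have he : ((2 : Int) + (50000 : Nat)) * (2 + (50000 : Nat)) = 2500200004 := by norm_num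
      rw [he]; omega)]
    have hcast : ((p.toNat : Int)) = p := Int.toNat_of_nonneg (by omega)
    constructor
    · intro h
      refine ⟨h2, Nat.prime_def_le_sqrt.mpr ⟨by omega, fun m hm hms hdvd => ?_⟩⟩
      have hmm : m * m ≤ p.toNat := Nat.le_sqrt.mp hms
      refine h (m : Int) (by exact_mod_cast hm) ?_ ?_
      · calc ((m : Int)) * (m : Int) = ((m * m : Nat) : Int) := by push_cast; ring
          _ ≤ ((p.toNat : Int)) := by exact_mod_cast hmm
          _ = p := hcast
      · rw [← hcast]; exact_mod_cast hdvd
    · rintro ⟨_, hprime⟩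
      intro m hm hmp hdvd
      have hm0 : 0 ≤ m := by omega
      have hmc : ((m.toNat : Int)) = m := Int.toNat_of_nonneg hm0
      have hdvdN : m.toNat ∣ p.toNat := by
        rw [← Int.natCast_dvd_natCast, hmc, hcast]; exact hdvd
      have hms : m.toNat ≤ p.toNat.sqrt := Nat.le_sqrt.mpr (by
        have : ((m.toNat * m.toNat : Nat) : Int) ≤ ((p.toNat : Int)) := by
          push_cast; rw [hmc, hcast]; exact hmp
        exact_mod_cast this)
      exact (Nat.prime_def_le_sqrt.mp hprime).2 m.toNat (by omega) hms hdvdN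

theorem pvNoTwinWindow (q : Nat) (h1 : 999960 ≤ q) (h2 : q ≤ 999997) :
    ¬ (Nat.Prime q ∧ Nat.Prime (q + 2)) := by
  interval_cases q <;> norm_num

theorem pvSieve_false_iff (k : Nat) (hk : k < 1000000) : (pvSieve[k]! = false) ↔ Nat.Prime k := by
  have h := pvSieve_char.2 k hk
  constructor
  · intro hb
    by_contra hp
    exact absurd (h.mpr hp) (by simp [hb])
  · intro hp
    cases hb : pvSieve[k]! with
    | false => rfl
    | true => exact absurd (h.mp hb) (not_not.mpr hp)

theorem pvStepPos (fuel : Nat) (p1 : Int) (h0 : 0 ≤ p1) (hub : p1 ≤ 999959) :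
    pvSearch (fuel + 1) pvSieve p1 =
      if Nat.Prime p1.toNat ∧ Nat.Prime (p1.toNat + 2) then [p1, p1 + 2]
      else pvSearch fuel pvSieve (p1 + 1) := by
  have ht2 : (p1 + 2).toNat = p1.toNat + 2 := by omega
  rw [pvSearch, if_neg (by omega)]
  simp only [if_neg (show ¬ p1 < 0 by omega), if_neg (show ¬ (1000000:Int) ≤ p1 + 2 by omega),
    if_neg (show ¬ p1 + 2 < 0 by omega), ht2]
  by_cases hp1 : Nat.Prime p1.toNat
  · rw [if_pos ((pvSieve_false_iff p1.toNat (by omega)).mpr hp1)]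
    by_cases hp2 : Nat.Prime (p1.toNat + 2)
    · rw [if_pos ((pvSieve_false_iff _ (by omega)).mpr hp2), if_pos ⟨hp1, hp2⟩]
    · rw [if_neg (fun h => hp2 ((pvSieve_false_iff _ (by omega)).mp h)),
        if_neg (fun h => hp2 h.2)]
  · rw [if_neg (fun h => hp1 ((pvSieve_false_iff _ (by omega)).mp h)),
      if_neg (fun h => hp1 h.1)]

theorem pvStepNeg (fuel : Nat) (p1 : Int) (hlb : -1000000 ≤ p1) (hub : p1 ≤ -3) :
    pvSearch (fuel + 1) pvSieve p1 =
      if Nat.Prime (p1 + 1000000).toNat ∧ Nat.Prime ((p1 + 1000000).toNat + 2) then [p1, p1 + 2]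
      else pvSearch fuel pvSieve (p1 + 1) := by
  have ht2 : (p1 + 2 + 1000000).toNat = (p1 + 1000000).toNat + 2 := by omega
  rw [pvSearch, if_neg (by omega)]
  simp only [if_pos (show p1 < 0 by omega), if_neg (show ¬ (1000000:Int) ≤ p1 + 2 by omega),
    if_pos (show p1 + 2 < 0 by omega), ht2]
  by_cases hp1 : Nat.Prime (p1 + 1000000).toNat
  · rw [if_pos ((pvSieve_false_iff _ (by omega)).mpr hp1)]
    by_cases hp2 : Nat.Prime ((p1 + 1000000).toNat + 2)
    · rw [if_pos ((pvSieve_false_iff _ (by omega)).mpr hp2), if_pos ⟨hp1, hp2⟩]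
    · rw [if_neg (fun h => hp2 ((pvSieve_false_iff _ (by omega)).mp h)),
        if_neg (fun h => hp2 h.2)]
  · rw [if_neg (fun h => hp1 ((pvSieve_false_iff _ (by omega)).mp h)),
      if_neg (fun h => hp1 h.1)]

theorem pvStepMid (fuel : Nat) (p1 : Int) (hlb : -2 ≤ p1) (hub : p1 ≤ 2) :
    pvSearch (fuel + 1) pvSieve p1 = pvSearch fuel pvSieve (p1 + 1) := by
  interval_cases p1
  · -- p1 = -2 : sieve[999998] is True (999998 composite)
    rw [pvSearch, if_neg (by norm_num)]
    simp only [show ((-2:Int) < 0) = True by simp, if_true,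
      show ((-2:Int) + 1000000).toNat = 999998 from rfl]
    rw [if_neg (fun h => (by norm_num : ¬ Nat.Prime 999998) ((pvSieve_false_iff 999998 (by norm_num)).mp h))]
  · -- p1 = -1 : sieve[999999] is True (999999 composite)
    rw [pvSearch, if_neg (by norm_num)]
    simp only [show ((-1:Int) < 0) = True by simp, if_true,
      show ((-1:Int) + 1000000).toNat = 999999 from rfl]
    rw [if_neg (fun h => (by norm_num : ¬ Nat.Prime 999999) ((pvSieve_false_iff 999999 (by norm_num)).mp h))]
  · rw [pvStepPos fuel 0 (by norm_num) (by norm_num), if_neg (by decide)]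
  · rw [pvStepPos fuel 1 (by norm_num) (by norm_num), if_neg (by decide)]
  · rw [pvStepPos fuel 2 (by norm_num) (by norm_num), if_neg (by decide)]

theorem pvSearch_from_neg : ∀ (k fuel : Nat) (p1 : Int), p1 = 3 - (k : Int) → -40 ≤ p1 →
    pvSearch (fuel + k) pvSieve p1 = pvSearch fuel pvSieve 3 := by
  intro k
  induction k with
  | zero =>
    intro fuel p1 hp _
    rw [hp]
    norm_num
  | succ k ih =>
    intro fuel p1 hp h1
    have hle : p1 ≤ 2 := by omega
    rw [show fuel + (k + 1) = (fuel + k) + 1 by omega]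
    by_cases hm : -2 ≤ p1
    · rw [pvStepMid (fuel + k) p1 hm hle]
      exact ih fuel (p1 + 1) (by omega) (by omega)
    · rw [pvStepNeg (fuel + k) p1 (by omega) (by omega)]
      rw [if_neg (pvNoTwinWindow (p1 + 1000000).toNat (by omega) (by omega))]
      exact ih fuel (p1 + 1) (by omega) (by omega)

theorem pvCond_iff (p1 : Int) (h3 : 3 ≤ p1) (hub : p1 ≤ 999959) :
    ((pvIsPrime p1 && pvIsPrime (p1 + 2)) = true) ↔
      (Nat.Prime p1.toNat ∧ Nat.Prime (p1.toNat + 2)) := by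
  have ht2 : (p1 + 2).toNat = p1.toNat + 2 := by omega
  rw [Bool.and_eq_true, pvIsPrime_iff p1 (by omega), pvIsPrime_iff (p1 + 2) (by omega), ht2]
  constructor
  · rintro ⟨⟨_, a⟩, ⟨_, b⟩⟩; exact ⟨a, b⟩
  · rintro ⟨a, b⟩; exact ⟨⟨by omega, a⟩, ⟨by omega, b⟩⟩

theorem pvSearch_eq_find : ∀ (k fuel1 fuel2 : Nat) (p1 : Int), 3 ≤ p1 → p1 ≤ 999959 →
    (999959 - p1).toNat ≤ k → k < fuel1 → k < fuel2 →
    pvSearch fuel1 pvSieve p1 = pvFind fuel2 p1 := by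
  intro k
  induction k with
  | zero =>
    intro fuel1 fuel2 p1 h3 hub hk hf1 hf2
    have h9 : p1 = 999959 := by omega
    subst h9
    obtain ⟨f1, rfl⟩ : ∃ f, fuel1 = f + 1 := ⟨fuel1 - 1, by omega⟩
    obtain ⟨f2, rfl⟩ : ∃ f, fuel2 = f + 1 := ⟨fuel2 - 1, by omega⟩
    have hc : Nat.Prime (999959 : Int).toNat ∧ Nat.Prime ((999959 : Int).toNat + 2) := by
      have h0 : (999959 : Int).toNat = 999959 := rfl
      rw [h0]
      exact ⟨by norm_num, by norm_num⟩
    rw [pvStepPos f1 999959 (by norm_num) (by norm_num), if_pos hc, pvFind,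
      if_pos ((pvCond_iff 999959 (by norm_num) (by norm_num)).mpr hc)]
  | succ k ih =>
    intro fuel1 fuel2 p1 h3 hub hk hf1 hf2
    obtain ⟨f1, rfl⟩ : ∃ f, fuel1 = f + 1 := ⟨fuel1 - 1, by omega⟩
    obtain ⟨f2, rfl⟩ : ∃ f, fuel2 = f + 1 := ⟨fuel2 - 1, by omega⟩
    rw [pvStepPos f1 p1 (by omega) hub, pvFind]
    by_cases hc : Nat.Prime p1.toNat ∧ Nat.Prime (p1.toNat + 2)
    · rw [if_pos hc, if_pos ((pvCond_iff p1 h3 hub).mpr hc)]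
    · rw [if_neg hc, if_neg (fun h => hc ((pvCond_iff p1 h3 hub).mp h))]
      have hne : p1 ≠ 999959 := by
        rintro rfl
        apply hc
        have h0 : (999959 : Int).toNat = 999959 := rfl
        rw [h0]
        exact ⟨by norm_num, by norm_num⟩
      exact ih f1 f2 (p1 + 1) (by omega) (by omega) (by omega) (by omega) (by omega)

theorem pvSearch_stops_neg : ∀ (k fuel : Nat) (p1 : Int), p1 = -41 - (k : Int) →
    -1000000 ≤ p1 → k < fuel →
    ∃ p : Int, p1 ≤ p ∧ p ≤ -41 ∧ pvSearch fuel pvSieve p1 = [p, p + 2] := by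
  intro k
  induction k with
  | zero =>
    intro fuel p1 hp _ hf
    obtain ⟨f, rfl⟩ : ∃ f, fuel = f + 1 := ⟨fuel - 1, by omega⟩
    have hp41 : p1 = -41 := by omega
    subst hp41
    refine ⟨-41, le_rfl, le_rfl, ?_⟩
    rw [pvStepNeg f (-41) (by norm_num) (by norm_num)]
    rw [if_pos (by
      have h9 : (-41 + 1000000 : Int).toNat = 999959 := rfl
      rw [h9]
      exact ⟨by norm_num, by norm_num⟩)]
  | succ k ih =>
    intro fuel p1 hp hlb hf
    obtain ⟨f, rfl⟩ : ∃ f, fuel = f + 1 := ⟨fuel - 1, by omega⟩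
    rw [pvStepNeg f p1 (by omega) (by omega)]
    by_cases hc : Nat.Prime (p1 + 1000000).toNat ∧ Nat.Prime ((p1 + 1000000).toNat + 2)
    · exact ⟨p1, le_rfl, by omega, by rw [if_pos hc]⟩
    · obtain ⟨p, hp1, hp2, hA⟩ := ih f (p1 + 1) (by omega) (by omega) (by omega)
      exact ⟨p, by omega, hp2, by rw [if_neg hc]; exact hA⟩

theorem pvFind3 : pvFind 1000000 3 = [3, 5] := by
  have h3 : pvIsPrime 3 = true := (pvIsPrime_iff 3 (by norm_num)).mpr ⟨by norm_num, by decide⟩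
  have h5 : pvIsPrime 5 = true := (pvIsPrime_iff 5 (by norm_num)).mpr ⟨by norm_num, by decide⟩
  conv_lhs => rw [show (1000000 : Nat) = 999999 + 1 from rfl]
  rw [pvFind]
  norm_num [h3, h5]

-- ===== VERDICT (by name: the statement is the Claim_ definition above) =====
theorem TwinPrimeNumbersLargerThanN_spec : Claim_unchanged_TwinPrimeNumbersLargerThanN := by
  intro n _ hpre
  unfold Spec_TwinPrimeNumbersLargerThanN
  intro hnd
  unfold Pre_TwinPrimeNumbersLargerThanN at hpre
  unfold D_TwinPrimeNumbersLargerThanN at hnd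
  unfold TwinPrimeNumbersLargerThanN TwinPrimeNumbersLargerThanN_alt
  by_cases hc : n + 1 > 3
  · rw [if_pos hc]
    exact pvSearch_eq_find (999959 - (n + 1)).toNat 2000002 1000000 (n + 1)
      (by omega) (by omega) (by omega) (by omega) (by omega)
  · rw [if_neg hc]
    have hk43 : (3 - (n + 1)).toNat ≤ 43 := by omega
    have h1 : pvSearch 2000002 pvSieve (n + 1) =
        pvSearch (2000002 - (3 - (n + 1)).toNat) pvSieve 3 := by
      conv_lhs => rw [show (2000002 : Nat) = (2000002 - (3 - (n + 1)).toNat) + (3 - (n + 1)).toNat by omega]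
      exact pvSearch_from_neg (3 - (n + 1)).toNat (2000002 - (3 - (n + 1)).toNat) (n + 1)
        (by omega) (by omega)
    rw [h1]
    exact pvSearch_eq_find 999956 (2000002 - (3 - (n + 1)).toNat) 1000000 3
      (by omega) (by omega) (by omega) (by omega) (by omega)

theorem TwinPrimeNumbersLargerThanN_changed : Claim_changed_TwinPrimeNumbersLargerThanN := by
  unfold Claim_changed_TwinPrimeNumbersLargerThanN pvDiffWitness_TwinPrimeNumbersLargerThanN
    pvDiffWitnessOut_TwinPrimeNumbersLargerThanN
  refine ⟨by decide, by decide, by decide, ?_, ?_, by decide⟩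
  · unfold TwinPrimeNumbersLargerThanN
    rw [show (-42 : Int) + 1 = -41 by norm_num]
    rw [show (2000002 : Nat) = 2000001 + 1 from rfl]
    rw [pvStepNeg 2000001 (-41) (by norm_num) (by norm_num)]
    rw [if_pos (by
      have h9 : (-41 + 1000000 : Int).toNat = 999959 := rfl
      rw [h9]
      exact ⟨by norm_num, by norm_num⟩)]
    norm_num
  · unfold TwinPrimeNumbersLargerThanN_alt
    rw [if_neg (by norm_num)]
    exact pvFind3

theorem TwinPrimeNumbersLargerThanN_tight : Claim_exact_TwinPrimeNumbersLargerThanN := by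
  unfold Claim_exact_TwinPrimeNumbersLargerThanN
  intro n _ hpre hd
  unfold Pre_TwinPrimeNumbersLargerThanN at hpre
  unfold D_TwinPrimeNumbersLargerThanN at hd
  have hB : TwinPrimeNumbersLargerThanN_alt n = [3, 5] := by
    unfold TwinPrimeNumbersLargerThanN_alt
    rw [if_neg (by omega)]
    exact pvFind3
  obtain ⟨p, hp1, hp2, hA⟩ := pvSearch_stops_neg (-41 - (n + 1)).toNat 2000002 (n + 1)
    (by omega) (by omega) (by omega)
  unfold TwinPrimeNumbersLargerThanN
  rw [hA, hB]
  intro h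
  simp at h
  omega
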